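-- pv_equiv track=rewrite | github.com/emdemor/cov19 | covid/functions.py | distribute_among_walkers
-- ===== SOURCE A (Python) =====
-- def distribute_among_walkers(quantity,walkers):
--
--     '''
--     Description
--     ----------
--     This function returns a list with size equal to "walkers".
--     Its divide the "quantity" for the number of walkers keeping
--     the modules on the firsts.
--     '''
--
--     div_int = quantity//walkers
--     div_mod = quantity%walkers
--
--     walkers_list = []
--
--     for index in range(walkers):
--         mod_sum = 1 if index < div_mod else 0
--         walker_stps = div_int + mod_sum
--         walkers_list.append(walker_stps)
--
--     return(walkers_list)
-- ===== SOURCE B (Python) =====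
-- def distribute_among_walkers(quantity, walkers):
--     # Sequential greedy fair division: each walker takes the ceiling of the
--     # remaining quantity divided by the remaining number of walkers.
--     result = []
--     q, w = quantity, walkers
--     while w > 0:
--         head = -((-q) // w)   # ceil(q / w) for w > 0
--         result.append(head)
--         q -= head
--         w -= 1
--     return result
-- ===== Notes on version B (the rewrite author's own statement) =====
-- stated objective: alternative
-- what changed: Replaces the precomputed quotient/remainder plus per-index remainder test by a sequential greedy loop that repeatedly assigns ceil(remaining_quantity/remaining_walkers) and subtracts it, maintaining a shrinking-remainder invariant instead of a fixed div/mod split.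
import Mathlib
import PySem

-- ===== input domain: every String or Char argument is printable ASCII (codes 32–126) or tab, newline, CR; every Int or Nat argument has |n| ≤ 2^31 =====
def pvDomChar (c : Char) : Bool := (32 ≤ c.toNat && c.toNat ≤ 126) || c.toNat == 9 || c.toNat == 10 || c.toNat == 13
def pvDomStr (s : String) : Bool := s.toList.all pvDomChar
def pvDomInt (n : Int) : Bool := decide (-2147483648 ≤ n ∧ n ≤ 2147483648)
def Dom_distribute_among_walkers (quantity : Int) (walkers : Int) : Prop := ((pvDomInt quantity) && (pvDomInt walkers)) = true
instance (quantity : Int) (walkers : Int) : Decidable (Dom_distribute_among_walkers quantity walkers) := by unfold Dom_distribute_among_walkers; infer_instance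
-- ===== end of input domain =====

-- B replaces A's precomputed div/mod with per-index test by a sequential greedy loop giving each walker ceil(remaining/left); alternative algorithm, same cost.


-- ===== PORT A =====
-- loop 'for index in range(walkers): append(div_int + (1 if index < div_mod else 0))'
def distribute_among_walkers (quantity : Int) (walkers : Int) : List Int :=
  let div_int := PySem.Int.floordiv quantity walkers
  let div_mod := PySem.Int.mod quantity walkers
  (PySem.List.pyRange 0 walkers 1).foldl
    (fun walkers_list index =>
      let mod_sum : Int := if index < div_mod then 1 else 0
      let walker_stps := div_int + mod_sum
      walkers_list ++ [walker_stps])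
    []

-- ===== PORT B =====
-- the 'while w > 0' loop of Source B: head = -((-q)//w) (= ceil(q/w)), append, q -= head, w -= 1
def distribute_among_walkers_alt_loop (q : Int) (w : Int) (result : List Int) : List Int :=
  if _h : 0 < w then
    let head := -(PySem.Int.floordiv (-q) w)
    distribute_among_walkers_alt_loop (q - head) (w - 1) (result ++ [head])
  else result
termination_by w.toNat
decreasing_by omega

def distribute_among_walkers_alt (quantity : Int) (walkers : Int) : List Int :=
  distribute_among_walkers_alt_loop quantity walkers []

-- ===== PRECONDITION & SPEC =====
-- Python A raises ZeroDivisionError exactly when walkers = 0; Pre_ excludes only that.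
def Pre_distribute_among_walkers (quantity : Int) (walkers : Int) : Prop := walkers ≠ 0
instance (quantity : Int) (walkers : Int) : Decidable (Pre_distribute_among_walkers quantity walkers) := by unfold Pre_distribute_among_walkers; infer_instance
def pvWitness_distribute_among_walkers : Int × Int := (7, 3)
def Spec_distribute_among_walkers (quantity : Int) (walkers : Int) (out : List Int) : Prop := out = distribute_among_walkers_alt quantity walkers
instance (quantity : Int) (walkers : Int) (out : List Int) : Decidable (Spec_distribute_among_walkers quantity walkers out) := by unfold Spec_distribute_among_walkers; infer_instance

-- ===== CLAIM =====
def Claim_equal_distribute_among_walkers : Prop := ∀ (quantity : Int) (walkers : Int), Dom_distribute_among_walkers quantity walkers → Pre_distribute_among_walkers quantity walkers → Spec_distribute_among_walkers quantity walkers (distribute_among_walkers quantity walkers)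

-- ===== LEMMAS AND PROOFS =====

-- A's append-loop is a map
theorem foldl_append_singleton {α β : Type} (f : α → β) (l : List α) (acc : List β) :
    l.foldl (fun a x => a ++ [f x]) acc = acc ++ l.map f := by
  induction l generalizing acc with
  | nil => simp
  | cons x xs ih => simp [List.foldl, ih]

-- A's mapped range is two replicated blocks
theorem map_range_ite_eq_replicates (d m : Int) (n : Nat) (hm : 0 ≤ m) (hmn : m ≤ (n : Int)) :
    (List.range n).map (fun k : Nat => d + (if (k : Int) < m then (1 : Int) else 0)) =
      List.replicate m.toNat (d + 1) ++ List.replicate (n - m.toNat) d := by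
  apply List.ext_getElem
  · simp; omega
  · intro k h1 h2
    simp only [List.getElem_map, List.getElem_range]
    rcases lt_or_ge k m.toNat with hk | hk
    · rw [List.getElem_append_left (by simpa using hk)]
      simp only [List.getElem_replicate]
      rw [if_pos (by omega)]
    · rw [List.getElem_append_right (by simpa using hk)]
      simp only [List.getElem_replicate]
      rw [if_neg (by omega)]
      omega

-- B's greedy loop produces the same two replicated blocks (invariant proof, induction on walkers)
theorem alt_loop_blocks : ∀ (n : Nat) (q : Int) (acc : List Int), 0 < n →
    distribute_among_walkers_alt_loop q (n : Int) acc =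
      acc ++ List.replicate (PySem.Int.mod q n).toNat (PySem.Int.floordiv q n + 1)
          ++ List.replicate ((n : Int) - PySem.Int.mod q n).toNat (PySem.Int.floordiv q n) := by
  intro n
  induction n with
  | zero => intro q acc h; omega
  | succ k ih =>
    intro q acc _
    set w : Int := ((k + 1 : Nat) : Int) with hw
    have hwpos : 0 < w := by omega
    set d := PySem.Int.floordiv q w with hd
    set m := PySem.Int.mod q w with hm
    have hqd : d * w + m = q := PySem.Int.floordiv_mul_add_mod q w
    have hm0 : 0 ≤ m := PySem.Int.mod_nonneg q hwpos
    have hmw : m < w := PySem.Int.mod_lt q hwpos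
    have hwk1 : w = (k : Int) + 1 := by push_cast [hw]; ring
    have hq' : q = d * (k : Int) + d + m := by
      have h := hqd; rw [hwk1] at h; ring_nf at h ⊢; linarith
    have hhead : -(PySem.Int.floordiv (-q) w) = d + (if 0 < m then 1 else 0) := by
      rw [PySem.Int.neg_floordiv_neg_eq_iff_of_pos hwpos]
      split_ifs with hmpos
      · constructor <;> nlinarith [hq']
      · constructor <;> nlinarith [hq']
    rw [distribute_among_walkers_alt_loop]
    rw [dif_pos hwpos]
    simp only [hhead]
    have hwk : w - 1 = (k : Int) := by omega
    rcases Nat.eq_zero_or_pos k with hk0 | hkpos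
    · -- last walker: w = 1, m = 0, head = d, loop ends
      subst hk0
      have hm0' : m = 0 := by omega
      rw [distribute_among_walkers_alt_loop]
      rw [dif_neg (by omega)]
      simp [hm0', hw]
    · -- w ≥ 2: recursive step on k walkers
      have hkpos' : (0 : Int) < (k : Int) := by exact_mod_cast hkpos
      split_ifs with hmpos
      · -- m > 0: head = d + 1, remaining has quotient d, remainder m - 1
        have hfd : PySem.Int.floordiv (q - (d + 1)) (k : Int) = d := by
          rw [PySem.Int.floordiv_eq_iff_of_pos hkpos']
          constructor <;> nlinarith [hq']
        have hfm : PySem.Int.mod (q - (d + 1)) (k : Int) = m - 1 := by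
          have hh := PySem.Int.floordiv_mul_add_mod (q - (d + 1)) (k : Int)
          rw [hfd] at hh
          linarith [hq']
        rw [hwk, ih (q - (d + 1)) (acc ++ [d + 1]) hkpos, hfd, hfm]
        have h1 : m.toNat = (m - 1).toNat + 1 := by omega
        have h2 : (w - m).toNat = ((k : Int) - (m - 1)).toNat := by omega
        rw [h1, h2, List.replicate_succ]
        simp
      · -- m = 0: head = d, remaining has quotient d, remainder 0
        have hm0' : m = 0 := by omega
        have hfd : PySem.Int.floordiv (q - (d + 0)) (k : Int) = d := by
          rw [PySem.Int.floordiv_eq_iff_of_pos hkpos']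
          constructor <;> nlinarith [hq']
        have hfm : PySem.Int.mod (q - (d + 0)) (k : Int) = 0 := by
          have hh := PySem.Int.floordiv_mul_add_mod (q - (d + 0)) (k : Int)
          rw [hfd] at hh
          linarith [hq']
        rw [hwk, ih (q - (d + 0)) (acc ++ [d + 0]) hkpos, hfd, hfm]
        have h4 : w.toNat = k + 1 := by omega
        simp [hm0', h4, List.replicate_succ]

-- ===== VERDICT =====
theorem distribute_among_walkers_spec : Claim_equal_distribute_among_walkers := by
  intro q w _ hw
  unfold Spec_distribute_among_walkers distribute_among_walkers distribute_among_walkers_alt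
  simp only []
  rw [foldl_append_singleton, List.nil_append, PySem.List.pyRange_one]
  set d := PySem.Int.floordiv q w with hd
  set m := PySem.Int.mod q w with hm
  rcases lt_or_gt_of_ne hw with hneg | hpos
  · -- walkers < 0: both sides empty
    have hle : ¬ 0 < w := by omega
    rw [distribute_among_walkers_alt_loop, dif_neg hle]
    simp
    omega
  · -- walkers > 0
    have h0 : 0 ≤ m := PySem.Int.mod_nonneg q hpos
    have h1 : m < w := PySem.Int.mod_lt q hpos
    have hn : w = ((w.toNat : Nat) : Int) := by omega
    have hnpos : 0 < w.toNat := by omega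
    rw [hn, alt_loop_blocks w.toNat q [] hnpos, List.nil_append, ← hn, ← hd, ← hm]
    have hsub : (w - 0).toNat - m.toNat = (w - m).toNat := by omega
    rw [List.map_map]
    have hfun : ((fun index => d + if index < m then (1 : Int) else 0) ∘ fun k : Nat => 0 + (k : Int))
        = (fun k : Nat => d + if (k : Int) < m then (1 : Int) else 0) := by
      funext k; simp
    rw [hfun, map_range_ite_eq_replicates d m (w - 0).toNat h0 (by omega), hsub]
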